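-- pv_equiv track=rewrite | github.com/tangyrrrr/OPNs-K-Means | OPNs-Kmeans-Clustering/src/common/gen_pairs.py | seq_all_pairs_list
-- ===== SOURCE A (Python) =====
-- def seq_all_pairs(seq):
--     """
--     使用生成器计算所有可能的配对
--     """
--     if len(seq) < 2:
--         return
--     elif len(seq) == 2:
--         yield [tuple(seq)]
--     else:
--         first = seq[0]
--         rest = seq[1:]
--         for i in range(len(rest)):
--             pair = (first, rest[i])
--             for p in seq_all_pairs(rest[:i] + rest[i + 1:]):
--                 yield [pair] + p
--
-- def seq_all_pairs_list(seq):
--     """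
--     返回所有可能的配对列表
--     """
--     result = []
--     if len(seq) < 2:
--         return result
--     elif len(seq) == 2:
--         result.append([tuple(seq)])
--     else:
--         first = seq[0]
--         rest = seq[1:]
--         for i in range(len(rest)):
--             pair = (first, rest[i])
--             for p in seq_all_pairs(rest[:i] + rest[i + 1:]):
--                 result.append([pair] + p)
--     return result
-- ===== SOURCE B (Python) =====
-- def seq_all_pairs_list(seq):
--     """Iterative level-synchronous (BFS) enumeration of all perfect matchings.
--
--     A frontier of (remaining, pairs_so_far) states is expanded round by round;
--     since every state at the same round has the same remaining length, the
--     leaf order equals the recursive DFS pre-order of the original.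
--     """
--     n = len(seq)
--     if n < 2 or n % 2 == 1:
--         return []
--     frontier = [(list(seq), [])]
--     for _ in range((n - 2) // 2):
--         nxt = []
--         for rem, acc in frontier:
--             first, rest = rem[0], rem[1:]
--             for i in range(len(rest)):
--                 nxt.append((rest[:i] + rest[i + 1:], acc + [(first, rest[i])]))
--         frontier = nxt
--     return [acc + [(rem[0], rem[1])] for rem, acc in frontier]
-- ===== Notes on version B (the rewrite author's own statement) =====
-- stated objective: alternative
-- what changed: Replaces the recursive generator with an iterative level-synchronous (BFS) worklist: a frontier of (remaining, pairs_so_far) states is expanded a fixed number of rounds and the final pair is emitted by a comprehension; no recursion or generators.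
import Mathlib
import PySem

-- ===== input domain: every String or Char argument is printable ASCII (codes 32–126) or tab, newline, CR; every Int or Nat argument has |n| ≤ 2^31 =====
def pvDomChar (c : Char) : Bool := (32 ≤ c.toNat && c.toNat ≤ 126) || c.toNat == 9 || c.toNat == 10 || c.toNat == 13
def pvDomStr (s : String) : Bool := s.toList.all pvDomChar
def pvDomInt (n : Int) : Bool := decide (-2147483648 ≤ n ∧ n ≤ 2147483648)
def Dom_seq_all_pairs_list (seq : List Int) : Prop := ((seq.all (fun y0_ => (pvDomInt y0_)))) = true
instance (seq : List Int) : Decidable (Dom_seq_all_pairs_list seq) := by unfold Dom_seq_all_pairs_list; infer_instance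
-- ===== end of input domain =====

-- B replaces A's recursive generator by an iterative level-synchronous (BFS) frontier
-- expansion; same values in the same order (objective: alternative decomposition).
-- ===== PORT A =====
-- A is the recursive generator `seq_all_pairs` plus a list wrapper with the same body.
def seqAllPairs (seq : List Int) : List (List (Int × Int)) :=
  if seq.length < 2 then []
  else if seq.length = 2 then [[(seq.getD 0 0, seq.getD 1 0)]]  -- tuple(seq); indices in range
  else
    match seq with
    | [] => []  -- unreachable: seq.length ≥ 3 here
    | first :: rest =>
      (List.range rest.length).flatMap (fun i =>
        (seqAllPairs (rest.take i ++ rest.drop (i + 1))).map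
          (fun p => (first, rest.getD i 0) :: p))
termination_by seq.length
decreasing_by
  simp only [List.length_append, List.length_take, List.length_drop, List.length_cons]
  omega

def seq_all_pairs_list (seq : List Int) : List (List (Int × Int)) :=
  if seq.length < 2 then []
  else if seq.length = 2 then [[(seq.getD 0 0, seq.getD 1 0)]]
  else
    match seq with
    | [] => []  -- unreachable
    | first :: rest =>
      (List.range rest.length).flatMap (fun i =>
        (seqAllPairs (rest.take i ++ rest.drop (i + 1))).map
          (fun p => (first, rest.getD i 0) :: p))

-- ===== PORT B =====
-- One expansion round of the frontier (the body of B's `for _ in range(...)` loop).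
def altExpand (fr : List (List Int × List (Int × Int))) : List (List Int × List (Int × Int)) :=
  fr.flatMap (fun st =>
    match st.1 with
    | [] => []  -- unreachable: every remaining list has length ≥ 4 while the loop runs
    | first :: rest =>
      (List.range rest.length).map (fun i =>
        (rest.take i ++ rest.drop (i + 1), st.2 ++ [(first, rest.getD i 0)])))

def seq_all_pairs_list_alt (seq : List Int) : List (List (Int × Int)) :=
  if seq.length < 2 ∨ seq.length % 2 = 1 then []
  else
    let fr := (List.range ((seq.length - 2) / 2)).foldl (fun fr _ => altExpand fr) [(seq, [])]
    fr.map (fun st => st.2 ++ [(st.1.getD 0 0, st.1.getD 1 0)])  -- every remaining has length 2 here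

-- ===== PRECONDITION & SPEC =====
def Spec_seq_all_pairs_list (seq : List Int) (out : List (List (Int × Int))) : Prop := out = seq_all_pairs_list_alt seq
instance (seq : List Int) (out : List (List (Int × Int))) : Decidable (Spec_seq_all_pairs_list seq out) := by unfold Spec_seq_all_pairs_list; infer_instance

-- ===== CLAIM (what is proved, stated in full; the proofs are below) =====
def Claim_equal_seq_all_pairs_list : Prop := ∀ (seq : List Int), Dom_seq_all_pairs_list seq → Spec_seq_all_pairs_list seq (seq_all_pairs_list seq)


-- ===== LEMMAS AND PROOFS =====

-- the two A-side functions have identical bodies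
theorem listEq (seq : List Int) : seq_all_pairs_list seq = seqAllPairs seq := by
  unfold seq_all_pairs_list
  conv_rhs => rw [seqAllPairs.eq_def]

-- the recursive branch of seqAllPairs, for inputs of length ≥ 3
theorem seqAllPairs_cons (first : Int) (rest : List Int) (h : 2 ≤ rest.length) :
    seqAllPairs (first :: rest) =
      (List.range rest.length).flatMap (fun i =>
        (seqAllPairs (rest.take i ++ rest.drop (i + 1))).map
          (fun p => (first, rest.getD i 0) :: p)) := by
  rw [seqAllPairs.eq_def]
  rw [if_neg (by simp only [List.length_cons]; omega),
      if_neg (by simp only [List.length_cons]; omega)]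

-- odd-length inputs produce no matchings
theorem odd_nil : ∀ (n : Nat) (seq : List Int), seq.length = 2 * n + 1 → seqAllPairs seq = [] := by
  intro n
  induction n with
  | zero => intro seq h; rw [seqAllPairs.eq_def]; simp [h]
  | succ k ih =>
    intro seq h
    cases seq with
    | nil => simp at h
    | cons first rest =>
      simp only [List.length_cons] at h
      rw [seqAllPairs_cons first rest (by omega)]
      simp only [List.flatMap_eq_nil_iff, List.mem_range, List.map_eq_nil_iff]
      intro i hi
      apply ih
      simp only [List.length_append, List.length_take, List.length_drop]
      omega

-- a fold whose function ignores the element is iteration by length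
def altIter : Nat → List (List Int × List (Int × Int)) → List (List Int × List (Int × Int))
  | 0, fr => fr
  | m + 1, fr => altIter m (altExpand fr)

theorem foldl_ignore (l : List Nat) (fr : List (List Int × List (Int × Int))) :
    l.foldl (fun fr _ => altExpand fr) fr = altIter l.length fr := by
  induction l generalizing fr with
  | nil => rfl
  | cons a t ih => simp [List.foldl_cons, altIter, ih]

def emitF (st : List Int × List (Int × Int)) : List (List (Int × Int)) :=
  (seqAllPairs st.1).map (fun p => st.2 ++ p)

-- one expansion round preserves the concatenation of emitF over the frontier
theorem expand_correct (fr : List (List Int × List (Int × Int)))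
    (h : ∀ p ∈ fr, 3 ≤ (Prod.fst p).length) :
    (altExpand fr).flatMap emitF = fr.flatMap emitF := by
  induction fr with
  | nil => rfl
  | cons st t ih =>
    obtain ⟨rem, acc⟩ := st
    have hst : 3 ≤ rem.length := h (rem, acc) (List.mem_cons_self ..)
    cases rem with
    | nil => simp at hst
    | cons first rest =>
      simp only [List.length_cons] at hst
      have hsplit : altExpand ((first :: rest, acc) :: t) =
          (List.range rest.length).map (fun i =>
            (rest.take i ++ rest.drop (i + 1), acc ++ [(first, rest.getD i 0)])) ++ altExpand t := by
        simp [altExpand]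
      rw [hsplit, List.flatMap_append, ih (fun p hp => h p (List.mem_cons_of_mem _ hp)),
          List.flatMap_cons]
      congr 1
      conv_rhs => rw [emitF]
      rw [seqAllPairs_cons first rest (by omega)]
      simp [List.flatMap_map, List.map_flatMap, List.map_map, Function.comp_def, emitF]

-- main invariant: after m rounds on a frontier of remainders of length 2m+2,
-- emitting the final pair yields exactly the recursive enumeration
theorem iter_correct : ∀ (m : Nat) (fr : List (List Int × List (Int × Int))),
    (∀ p ∈ fr, (Prod.fst p).length = 2 * m + 2) →
    (altIter m fr).map (fun st => st.2 ++ [(st.1.getD 0 0, st.1.getD 1 0)]) = fr.flatMap emitF := by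
  intro m
  induction m with
  | zero =>
    intro fr h
    induction fr with
    | nil => rfl
    | cons st t ih =>
      obtain ⟨rem, acc⟩ := st
      have hst : rem.length = 2 := h (rem, acc) (List.mem_cons_self ..)
      show _ :: (altIter 0 t).map _ = _
      rw [ih (fun p hp => h p (List.mem_cons_of_mem _ hp)), List.flatMap_cons]
      cases rem with
      | nil => simp at hst
      | cons a r =>
        cases r with
        | nil => simp at hst
        | cons b r' =>
          cases r' with
          | cons c r'' => simp at hst
          | nil => rw [emitF, seqAllPairs.eq_def]; simp
  | succ k ih =>
    intro fr h
    show (altIter k (altExpand fr)).map _ = _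
    rw [ih (altExpand fr) ?_, expand_correct fr (fun p hp => by have := h p hp; omega)]
    intro p hp
    simp only [altExpand, List.mem_flatMap] at hp
    obtain ⟨st, hst, hp⟩ := hp
    have hl := h st hst
    obtain ⟨rem, acc⟩ := st
    cases rem with
    | nil => simp at hp
    | cons first rest =>
      simp only [List.mem_map, List.mem_range] at hp
      obtain ⟨i, hi, rfl⟩ := hp
      simp only [List.length_cons] at hl
      simp only [List.length_append, List.length_take, List.length_drop]
      omega

-- ===== VERDICT (by name: the statement is the Claim_ definition above) =====
theorem seq_all_pairs_list_spec : Claim_equal_seq_all_pairs_list := by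
  intro seq _
  show seq_all_pairs_list seq = seq_all_pairs_list_alt seq
  rw [listEq]
  unfold seq_all_pairs_list_alt
  by_cases h1 : seq.length < 2
  · rw [if_pos (Or.inl h1), seqAllPairs.eq_def, if_pos h1]
  · by_cases h2 : seq.length % 2 = 1
    · rw [if_pos (Or.inr h2)]
      exact odd_nil ((seq.length - 1) / 2) seq (by omega)
    · rw [if_neg (by tauto)]
      simp only [foldl_ignore, List.length_range]
      rw [iter_correct ((seq.length - 2) / 2) [(seq, [])] (by simp; omega)]
      simp [emitF]
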